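-- pv_equiv track=rewrite | github.com/BHTOM-Team/bhtom3 | custom_code/data_services/gaia_alerts_dataservice.py | _find_by_name
-- ===== SOURCE A (Python) =====
-- def _normalize_alert_name(value):
--     return str(value or '').strip()
--
-- def _row_alert_name(row):
--     return _normalize_alert_name(row.get('#Name') or row.get('Name'))
--
-- def _bare_alert_name(value):
--     normalized = _normalize_alert_name(value)
--     if normalized.lower().startswith('gaia'):
--         return normalized[4:]
--     return normalized
--
-- def _find_by_name(rows, alert_name):
--     search_value = _normalize_alert_name(alert_name)
--     if not search_value:
--         return []
--
--     search_lower = search_value.lower()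
--     prefixed_lower = search_lower if search_lower.startswith('gaia') else f'gaia{search_lower}'
--
--     exact_matches = []
--     prefix_matches = []
--     contains_matches = []
--     for row in rows:
--         full_name = _row_alert_name(row)
--         if not full_name:
--             continue
--         full_lower = full_name.lower()
--         bare_lower = _bare_alert_name(full_name).lower()
--
--         if full_lower == search_lower or full_lower == prefixed_lower or bare_lower == search_lower:
--             exact_matches.append(row)
--             continue
--         if bare_lower.startswith(search_lower) or full_lower.startswith(search_lower) or full_lower.startswith(prefixed_lower):
--             prefix_matches.append(row)
--             continue
--         if search_lower in bare_lower or search_lower in full_lower: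
--             contains_matches.append(row)
--
--     return exact_matches or prefix_matches or contains_matches
-- ===== SOURCE B (Python) =====
-- def _normalize_alert_name(value):
--     return str(value or '').strip()
--
-- def _row_alert_name(row):
--     return _normalize_alert_name(row.get('#Name') or row.get('Name'))
--
-- def _bare_alert_name(value):
--     normalized = _normalize_alert_name(value)
--     if normalized.lower().startswith('gaia'):
--         return normalized[4:]
--     return normalized
--
-- def _find_by_name(rows, alert_name):
--     search_value = _normalize_alert_name(alert_name)
--     if not search_value:
--         return []
--
--     search_lower = search_value.lower()
--     prefixed_lower = search_lower if search_lower.startswith('gaia') else f'gaia{search_lower}'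
--
--     def _names(row):
--         full_name = _row_alert_name(row)
--         if not full_name:
--             return None
--         return full_name.lower(), _bare_alert_name(full_name).lower()
--
--     def _is_exact(row):
--         n = _names(row)
--         return n is not None and (
--             n[0] == search_lower or n[0] == prefixed_lower or n[1] == search_lower)
--
--     def _is_prefix(row):
--         n = _names(row)
--         return n is not None and (
--             n[1].startswith(search_lower) or n[0].startswith(search_lower)
--             or n[0].startswith(prefixed_lower))
--
--     def _is_contains(row):
--         n = _names(row)
--         return n is not None and (search_lower in n[1] or search_lower in n[0])
--
--     exact = [row for row in rows if _is_exact(row)]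
--     if exact:
--         return exact
--     prefix = [row for row in rows if _is_prefix(row)]
--     if prefix:
--         return prefix
--     return [row for row in rows if _is_contains(row)]
-- ===== Notes on version B (the rewrite author's own statement) =====
-- stated objective: simpler
-- what changed: Replaced the single loop that accumulates three tier lists simultaneously (with continue-based precedence) by three successive filter passes with early return: collect exact matches and return if any, else prefix matches, else contains matches; the later passes need no exclusion of earlier tiers because they only run when those tiers are empty.
import Mathlib
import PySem

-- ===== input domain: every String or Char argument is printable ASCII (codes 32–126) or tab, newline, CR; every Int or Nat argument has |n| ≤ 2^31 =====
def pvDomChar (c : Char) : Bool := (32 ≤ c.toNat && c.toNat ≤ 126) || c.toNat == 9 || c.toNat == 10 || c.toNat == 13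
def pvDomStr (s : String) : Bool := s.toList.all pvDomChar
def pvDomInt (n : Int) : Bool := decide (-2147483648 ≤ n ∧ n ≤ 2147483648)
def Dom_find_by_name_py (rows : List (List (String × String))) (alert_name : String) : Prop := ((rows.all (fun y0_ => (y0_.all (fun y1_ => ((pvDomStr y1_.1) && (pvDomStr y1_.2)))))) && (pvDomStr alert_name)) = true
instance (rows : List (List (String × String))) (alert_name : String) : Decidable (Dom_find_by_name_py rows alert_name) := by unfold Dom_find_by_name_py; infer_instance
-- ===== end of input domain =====

-- B replaces A's single accumulating loop (three tier lists, continue-based precedence)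
-- by three successive filter passes with early return; return values proved equal.

-- ===== PORT A =====
-- shared module helpers, used by both ports
-- _normalize_alert_name: str(value or '').strip(); 'some "" or none' both give ""
def pvNormAlert (value : Option String) : String := PySem.Str.strip (value.getD "")

-- _row_alert_name: row.get('#Name') or row.get('Name') — first operand wins iff it is a nonempty string
def pvRowAlertName (row : List (String × String)) : String :=
  pvNormAlert (match PySem.Dict.get? (PySem.Dict.mk row) "#Name" with
               | some s => if s = "" then PySem.Dict.get? (PySem.Dict.mk row) "Name" else some s
               | none => PySem.Dict.get? (PySem.Dict.mk row) "Name")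

-- _bare_alert_name
def pvBareAlertName (value : String) : String :=
  let normalized := pvNormAlert (some value)
  if PySem.Str.startswith (PySem.Str.lower normalized) "gaia" then
    PySem.Str.slice normalized (some 4) none
  else normalized

-- the body of A's for-loop, acting on the state (exact_matches, prefix_matches, contains_matches)
def pvStepA (search_lower prefixed_lower : String)
    (state : List (List (String × String)) × List (List (String × String)) × List (List (String × String)))
    (row : List (String × String)) :
    List (List (String × String)) × List (List (String × String)) × List (List (String × String)) :=
  let full_name := pvRowAlertName row
  if full_name = "" then state
  else
    let full_lower := PySem.Str.lower full_name
    let bare_lower := PySem.Str.lower (pvBareAlertName full_name)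
    if (full_lower == search_lower || full_lower == prefixed_lower || bare_lower == search_lower) then
      (state.1 ++ [row], state.2.1, state.2.2)
    else if (PySem.Str.startswith bare_lower search_lower || PySem.Str.startswith full_lower search_lower || PySem.Str.startswith full_lower prefixed_lower) then
      (state.1, state.2.1 ++ [row], state.2.2)
    else if (PySem.Str.isIn search_lower bare_lower || PySem.Str.isIn search_lower full_lower) then
      (state.1, state.2.1, state.2.2 ++ [row])
    else state

def find_by_name_py (rows : List (List (String × String))) (alert_name : String) : List (List (String × String)) :=
  let search_value := pvNormAlert (some alert_name)
  if search_value = "" then []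
  else
    let search_lower := PySem.Str.lower search_value
    let prefixed_lower := if PySem.Str.startswith search_lower "gaia" then search_lower else "gaia" ++ search_lower
    let st := rows.foldl (pvStepA search_lower prefixed_lower) ([], [], [])
    -- exact_matches or prefix_matches or contains_matches
    if st.1 ≠ [] then st.1 else if st.2.1 ≠ [] then st.2.1 else st.2.2

-- ===== PORT B =====
-- _names row: (full lower, bare lower) or None when the row's name is falsy
def pvNamesB (row : List (String × String)) : Option (String × String) :=
  let full_name := pvRowAlertName row
  if full_name = "" then none
  else some (PySem.Str.lower full_name, PySem.Str.lower (pvBareAlertName full_name))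

def pvIsExactB (search_lower prefixed_lower : String) (row : List (String × String)) : Bool :=
  match pvNamesB row with
  | none => false
  | some n => n.1 == search_lower || n.1 == prefixed_lower || n.2 == search_lower

def pvIsPrefixB (search_lower prefixed_lower : String) (row : List (String × String)) : Bool :=
  match pvNamesB row with
  | none => false
  | some n => PySem.Str.startswith n.2 search_lower || PySem.Str.startswith n.1 search_lower || PySem.Str.startswith n.1 prefixed_lower

def pvIsContainsB (search_lower : String) (row : List (String × String)) : Bool :=
  match pvNamesB row with
  | none => false
  | some n => PySem.Str.isIn search_lower n.2 || PySem.Str.isIn search_lower n.1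

def find_by_name_py_alt (rows : List (List (String × String))) (alert_name : String) : List (List (String × String)) :=
  let search_value := pvNormAlert (some alert_name)
  if search_value = "" then []
  else
    let search_lower := PySem.Str.lower search_value
    let prefixed_lower := if PySem.Str.startswith search_lower "gaia" then search_lower else "gaia" ++ search_lower
    let exact := rows.filter (pvIsExactB search_lower prefixed_lower)
    if exact ≠ [] then exact
    else
      let pref := rows.filter (pvIsPrefixB search_lower prefixed_lower)
      if pref ≠ [] then pref
      else rows.filter (pvIsContainsB search_lower)

-- ===== PRECONDITION & SPEC =====
def Spec_find_by_name_py (rows : List (List (String × String))) (alert_name : String) (out : List (List (String × String))) : Prop := out = find_by_name_py_alt rows alert_name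
instance (rows : List (List (String × String))) (alert_name : String) (out : List (List (String × String))) : Decidable (Spec_find_by_name_py rows alert_name out) := by unfold Spec_find_by_name_py; infer_instance

-- ===== CLAIM (what is proved, stated in full; the proofs are below) =====
def Claim_equal_find_by_name_py : Prop := ∀ (rows : List (List (String × String))) (alert_name : String), Dom_find_by_name_py rows alert_name → Spec_find_by_name_py rows alert_name (find_by_name_py rows alert_name)

-- ===== LEMMAS AND PROOFS =====

-- A's step is the canonical three-way classifier built from B's predicates
set_option maxHeartbeats 1000000 in
theorem pvStepA_eq (sl pl : String)
    (s : List (List (String × String)) × List (List (String × String)) × List (List (String × String)))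
    (r : List (String × String)) :
    pvStepA sl pl s r =
      (if pvIsExactB sl pl r then (s.1 ++ [r], s.2.1, s.2.2)
       else if pvIsPrefixB sl pl r then (s.1, s.2.1 ++ [r], s.2.2)
       else if pvIsContainsB sl r then (s.1, s.2.1, s.2.2 ++ [r])
       else s) := by
  simp only [pvStepA, pvIsExactB, pvIsPrefixB, pvIsContainsB, pvNamesB]
  by_cases h : pvRowAlertName r = ""
  · simp only [h, reduceIte]
    simp
  · simp only [h, reduceIte]

-- folding the classifier appends the three filtered sublists
theorem pvFoldl_classifier (E P C : List (String × String) → Bool)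
    (rows : List (List (String × String)))
    (e p c : List (List (String × String))) :
    rows.foldl (fun s r =>
        if E r then (s.1 ++ [r], s.2.1, s.2.2)
        else if P r then (s.1, s.2.1 ++ [r], s.2.2)
        else if C r then (s.1, s.2.1, s.2.2 ++ [r])
        else s) (e, p, c) =
      (e ++ rows.filter E,
       p ++ rows.filter (fun r => !E r && P r),
       c ++ rows.filter (fun r => !E r && !P r && C r)) := by
  induction rows generalizing e p c with
  | nil => simp
  | cons r rs ih =>
    by_cases hE : E r
    · simp [hE, ih]
    · by_cases hP : P r
      · simp [hE, hP, ih]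
      · by_cases hC : C r <;> simp [hE, hP, hC, ih]

-- ===== VERDICT (by name: the statement is the Claim_ definition above) =====
theorem find_by_name_py_spec : Claim_equal_find_by_name_py := by
  intro rows alert_name _
  show find_by_name_py rows alert_name = find_by_name_py_alt rows alert_name
  unfold find_by_name_py find_by_name_py_alt
  by_cases hsv : pvNormAlert (some alert_name) = ""
  · simp [hsv]
  · simp only [if_neg hsv]
    set sl := PySem.Str.lower (pvNormAlert (some alert_name)) with hsl
    set pl := if PySem.Str.startswith sl "gaia" then sl else "gaia" ++ sl with hpl
    have hfold : rows.foldl (pvStepA sl pl) ([], [], []) =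
        (rows.filter (pvIsExactB sl pl),
         rows.filter (fun r => !pvIsExactB sl pl r && pvIsPrefixB sl pl r),
         rows.filter (fun r => !pvIsExactB sl pl r && !pvIsPrefixB sl pl r && pvIsContainsB sl r)) := by
      have hfun : pvStepA sl pl = (fun s r =>
          if pvIsExactB sl pl r then (s.1 ++ [r], s.2.1, s.2.2)
          else if pvIsPrefixB sl pl r then (s.1, s.2.1 ++ [r], s.2.2)
          else if pvIsContainsB sl r then (s.1, s.2.1, s.2.2 ++ [r])
          else s) := by
        funext s r; exact pvStepA_eq sl pl s r
      rw [hfun, pvFoldl_classifier]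
      simp
    rw [hfold]
    by_cases hE : rows.filter (pvIsExactB sl pl) = []
    · have hEfalse : ∀ r ∈ rows, pvIsExactB sl pl r = false := by
        intro r hr
        by_contra hne
        have : r ∈ rows.filter (pvIsExactB sl pl) :=
          List.mem_filter.mpr ⟨hr, by simpa using hne⟩
        simp [hE] at this
      have hPfilt : rows.filter (fun r => !pvIsExactB sl pl r && pvIsPrefixB sl pl r)
          = rows.filter (pvIsPrefixB sl pl) := by
        apply List.filter_congr
        intro r hr; simp [hEfalse r hr]
      by_cases hP : rows.filter (pvIsPrefixB sl pl) = []
      · have hPfalse : ∀ r ∈ rows, pvIsPrefixB sl pl r = false := by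
          intro r hr
          by_contra hne
          have : r ∈ rows.filter (pvIsPrefixB sl pl) :=
            List.mem_filter.mpr ⟨hr, by simpa using hne⟩
          simp [hP] at this
        have hCfilt : rows.filter (fun r => !pvIsExactB sl pl r && !pvIsPrefixB sl pl r && pvIsContainsB sl r)
            = rows.filter (pvIsContainsB sl) := by
          apply List.filter_congr
          intro r hr; simp [hEfalse r hr, hPfalse r hr]
        simp [hE, hPfilt, hP, hCfilt]
      · simp [hE, hPfilt, hP]
    · simp [hE]
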